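-- pv_equiv track=rewrite | github.com/HemJVK/Culinary-Canvas | Culinary Canvas/menu_generator.py | parse_menu
-- ===== SOURCE A (Python) =====
-- from typing import Union, List, Dict, Tuple
--
-- def parse_menu(menu_string: str) -> List[Tuple[str, List[str]]]:
--     """
--     Parse the generated menu string into a structured format.
--
--     Args:
--         menu_string (str): The raw menu string to parse
--
--     Returns:
--         List[Tuple[str, List[str]]]: List of (section_heading, items) tuples
--
--     Raises:
--         ValueError: If menu string is invalid or empty
--     """
--     if not menu_string:
--         raise ValueError("Menu string cannot be empty")
--
--     sections = menu_string.strip().split('\n\n')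
--     parsed_menu = []
--
--     for section in sections:
--         lines = section.strip().split('\n')
--
--         # Extract heading
--         if not lines or not lines[0].strip():
--             continue
--
--         heading = lines[0].strip("* ")
--         if heading.startswith("**") and heading.endswith("**"):
--             heading = heading[2:-2].strip()
--
--         # Process items
--         items = []
--         current_item = []
--
--         for line in lines[1:]:
--             line = line.strip()
--             if line.startswith("*"):
--                 if current_item:
--                     items.append("\n".join(current_item))
--                     current_item = []
--                 current_item.append(line.lstrip("* "))
--             elif line:
--                 current_item.append(line)
--
--         if current_item:
--             items.append("\n".join(current_item))
--
--         if heading and items: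
--             parsed_menu.append((heading, items))
--
--     return parsed_menu
-- ===== SOURCE B (Python) =====
-- def _split_run(lines):
--     """Split off the leading run of lines that do not start with a star."""
--     k = 0
--     while k < len(lines) and not lines[k].startswith("*"):
--         k += 1
--     return lines[:k], lines[k:]
--
-- def _items(lines):
--     """Recursive descent over the (stripped) body lines: each call peels one
--     item group off the front and recurses on the remainder."""
--     if not lines:
--         return []
--     if lines[0].startswith("*"):
--         cont, rest = _split_run(lines[1:])
--         item = "\n".join([lines[0].lstrip("* ")] + [l for l in cont if l])
--         return [item] + _items(rest)
--     pre, rest = _split_run(lines)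
--     parts = [l for l in pre if l]
--     return (["\n".join(parts)] if parts else []) + _items(rest)
--
-- def _section(section):
--     lines = section.strip().split('\n')
--     if not lines[0].strip():
--         return None
--     heading = lines[0].strip("* ")
--     if heading.startswith("**") and heading.endswith("**"):
--         heading = heading[2:-2].strip()
--     items = _items([l.strip() for l in lines[1:]])
--     if heading and items:
--         return (heading, items)
--     return None
--
-- def parse_menu(menu_string):
--     """Parse the menu string into (heading, items) sections by recursive
--     descent: strip the body lines up front, then repeatedly split off the
--     leading run of non-'*' lines to delimit each item group."""
--     if not menu_string:
--         raise ValueError("Menu string cannot be empty")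
--     return [sec for sec in (_section(s) for s in menu_string.strip().split('\n\n'))
--             if sec is not None]
-- ===== Notes on version B (the rewrite author's own statement) =====
-- stated objective: alternative
-- what changed: A's single-pass flush-on-delimiter buffer state machine is replaced by a recursive descent: the body lines are stripped up front, then a recursive function repeatedly splits off the leading run of non-delimiter lines to peel one item group per call; sections are built by an Optional-producing helper filtered through a comprehension.
import Mathlib
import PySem

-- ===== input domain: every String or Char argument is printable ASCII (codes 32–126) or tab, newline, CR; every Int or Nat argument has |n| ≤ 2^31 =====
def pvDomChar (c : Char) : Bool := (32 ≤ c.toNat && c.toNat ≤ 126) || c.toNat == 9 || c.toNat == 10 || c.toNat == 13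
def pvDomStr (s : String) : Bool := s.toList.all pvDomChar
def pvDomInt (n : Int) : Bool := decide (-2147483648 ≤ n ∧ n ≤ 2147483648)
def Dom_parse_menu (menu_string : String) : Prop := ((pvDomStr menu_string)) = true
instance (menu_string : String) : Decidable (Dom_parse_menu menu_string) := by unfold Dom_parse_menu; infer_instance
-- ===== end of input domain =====

-- B replaces A's flush-on-delimiter buffer state machine by a recursive descent that
-- repeatedly splits off the leading run of non-delimiter lines (objective: alternative
-- decomposition, same cost).

-- ===== PORT A =====
-- common primitive helpers (both Pythons contain these identical lines):
-- Python lstrip("* "): drop leading chars from the set {'*', ' '} (exact hand port; PySem has no lstrip-with-chars)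
def pmLstripStarSpace (cs : List Char) : List Char := cs.dropWhile (fun c => c == '*' || c == ' ')

-- heading = lines[0].strip("* "); if it starts and ends with "**", heading = heading[2:-2].strip()
def pmHeading (l0 : List Char) : List Char :=
  let h := PySem.Chars.stripChars l0 "* ".toList
  if PySem.Chars.startswith h "**".toList && PySem.Chars.endswith h "**".toList then
    PySem.Chars.strip (PySem.List.slice h (some 2) (some (-2)))
  else h

-- A's loop body over (items, current_item)
def pmStepA (st : List (List Char) × List (List Char)) (line : List Char) :
    List (List Char) × List (List Char) :=
  let line := PySem.Chars.strip line
  if PySem.Chars.startswith line ['*'] then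
    let items := if st.2 ≠ [] then st.1 ++ [PySem.Chars.join ['\n'] st.2] else st.1
    (items, [pmLstripStarSpace line])
  else if line ≠ [] then (st.1, st.2 ++ [line])
  else st

def pmSectionA (acc : List (String × List String)) (sec : List Char) :
    List (String × List String) :=
  match PySem.Chars.splitOn (PySem.Chars.strip sec) ['\n'] with
  | [] => acc  -- Python's `if not lines` guard (splitOn never returns [])
  | l0 :: rest =>
    if PySem.Chars.strip l0 = [] then acc
    else
      let heading := pmHeading l0
      let st := rest.foldl pmStepA ([], [])
      let items := if st.2 ≠ [] then st.1 ++ [PySem.Chars.join ['\n'] st.2] else st.1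
      if heading ≠ [] ∧ items ≠ [] then
        acc ++ [(String.ofList heading, items.map String.ofList)]
      else acc

-- on "" Python raises ValueError (excluded by Pre_); below is the non-raising path
def parse_menu (menu_string : String) : List (String × List String) :=
  (PySem.Chars.splitOn (PySem.Chars.strip menu_string.toList) ['\n', '\n']).foldl pmSectionA []

-- ===== PORT B =====
def pmIsStar (l : List Char) : Bool := PySem.Chars.startswith l ['*']

-- _split_run: the while loop advances k over the leading run of non-star lines,
-- then returns lines[:k], lines[k:] — exactly takeWhile/dropWhile of that predicate
def pmSplitRun (lines : List (List Char)) : List (List Char) × List (List Char) :=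
  (lines.takeWhile (fun l => !pmIsStar l), lines.dropWhile (fun l => !pmIsStar l))

-- _items: recursive descent, one item group peeled off per call
def pmItems : List (List Char) → List (List Char)
  | [] => []
  | l :: rest =>
    if h : pmIsStar l = true then
      let p := pmSplitRun rest
      PySem.Chars.join ['\n'] (pmLstripStarSpace l :: p.1.filter (fun x => decide (x ≠ []))) ::
        pmItems p.2
    else
      let p := pmSplitRun (l :: rest)
      let parts := p.1.filter (fun x => decide (x ≠ []))
      (if parts ≠ [] then [PySem.Chars.join ['\n'] parts] else []) ++ pmItems p.2
  termination_by lines => lines.length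
  decreasing_by
  · simp only [pmSplitRun]
    have := List.length_dropWhile_le (fun l => !pmIsStar l) rest
    simp; omega
  · simp only [pmSplitRun, List.dropWhile_cons, h]
    have := List.length_dropWhile_le (fun l => !pmIsStar l) rest
    simp; omega

-- _section: returns the (heading, items) pair or None
def pmSectionB? (sec : List Char) : Option (String × List String) :=
  match PySem.Chars.splitOn (PySem.Chars.strip sec) ['\n'] with
  | [] => none
  | l0 :: rest =>
    if PySem.Chars.strip l0 = [] then none
    else
      let heading := pmHeading l0
      let items := pmItems (rest.map PySem.Chars.strip)
      if heading ≠ [] ∧ items ≠ [] then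
        some (String.ofList heading, items.map String.ofList)
      else none

-- the comprehension filtering out the Nones is List.filterMap
def parse_menu_alt (menu_string : String) : List (String × List String) :=
  (PySem.Chars.splitOn (PySem.Chars.strip menu_string.toList) ['\n', '\n']).filterMap pmSectionB?

-- ===== PRECONDITION & SPEC =====
-- Pre_ excludes exactly the empty string, on which A raises ValueError
def Pre_parse_menu (menu_string : String) : Prop := menu_string ≠ ""
instance (menu_string : String) : Decidable (Pre_parse_menu menu_string) := by
  unfold Pre_parse_menu; infer_instance

def pvWitness_parse_menu : String := "**Menu**\n* Soup\n* Bread"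

def Spec_parse_menu (menu_string : String) (out : List (String × List String)) : Prop :=
  out = parse_menu_alt menu_string
instance (menu_string : String) (out : List (String × List String)) :
    Decidable (Spec_parse_menu menu_string out) := by unfold Spec_parse_menu; infer_instance

-- ===== CLAIM (what is proved, stated in full; the proofs are below) =====
def Claim_equal_parse_menu : Prop := ∀ (menu_string : String), Dom_parse_menu menu_string →
  Pre_parse_menu menu_string → Spec_parse_menu menu_string (parse_menu menu_string)

-- ===== LEMMAS AND PROOFS =====

-- proof-only: A's post-loop flush of (items, current_item)
def pmFinish (st : List (List Char) × List (List Char)) : List (List Char) :=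
  if st.2 ≠ [] then st.1 ++ [PySem.Chars.join ['\n'] st.2] else st.1

-- proof-only: A's remaining loop as a recursion on the remaining lines, carrying current_item
def pmF (cur : List (List Char)) : List (List Char) → List (List Char)
  | [] => if cur ≠ [] then [PySem.Chars.join ['\n'] cur] else []
  | l :: rest =>
    let s := PySem.Chars.strip l
    if PySem.Chars.startswith s ['*'] then
      (if cur ≠ [] then [PySem.Chars.join ['\n'] cur] else []) ++ pmF [pmLstripStarSpace s] rest
    else if s ≠ [] then pmF (cur ++ [s]) rest
    else pmF cur rest

theorem pmF_eq_finish_fold (lines : List (List Char)) :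
    ∀ (items cur : List (List Char)),
      pmFinish (lines.foldl pmStepA (items, cur)) = items ++ pmF cur lines := by
  induction lines with
  | nil =>
    intro items cur
    by_cases h : cur = [] <;> simp [pmFinish, pmF, h]
  | cons l rest ih =>
    intro items cur
    simp only [List.foldl_cons, pmF]
    by_cases hs : PySem.Chars.startswith (PySem.Chars.strip l) ['*'] = true
    · have hA : pmStepA (items, cur) l =
          ((if cur ≠ [] then items ++ [PySem.Chars.join ['\n'] cur] else items),
           [pmLstripStarSpace (PySem.Chars.strip l)]) := by
        simp [pmStepA, hs]
      rw [hA, ih]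
      by_cases h : cur = [] <;> simp [h, hs]
    · by_cases hne : PySem.Chars.strip l = []
      · have h0 : PySem.Chars.startswith ([] : List Char) ['*'] = false := by decide
        have hA : pmStepA (items, cur) l = (items, cur) := by
          simp [pmStepA, hne, h0]
        rw [hA, ih]
        simp [hne, h0]
      · have hA : pmStepA (items, cur) l = (items, cur ++ [PySem.Chars.strip l]) := by
          simp [pmStepA, hs, hne]
        rw [hA, ih]
        simp [hs, hne]

-- the span formulation of pmF: split off the leading run of non-star stripped lines
theorem pmF_span (lines : List (List Char)) :
    ∀ (cur : List (List Char)),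
      pmF cur lines =
        (let ms := lines.map PySem.Chars.strip
         let parts := cur ++ (ms.takeWhile (fun l => !pmIsStar l)).filter (fun x => decide (x ≠ []))
         (if parts ≠ [] then [PySem.Chars.join ['\n'] parts] else []) ++
           pmItems (ms.dropWhile (fun l => !pmIsStar l))) := by
  induction lines with
  | nil => intro cur; simp [pmF, pmItems]
  | cons l rest ih =>
    intro cur
    by_cases hs : pmIsStar (PySem.Chars.strip l) = true
    · have h1 : PySem.Chars.startswith (PySem.Chars.strip l) ['*'] = true := hs
      simp only [pmF, h1, List.map_cons, List.takeWhile_cons, List.dropWhile_cons, hs,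
        Bool.not_true, ih]
      simp [pmItems, pmSplitRun, hs]
    · have h1 : PySem.Chars.startswith (PySem.Chars.strip l) ['*'] = false := by
        simpa [pmIsStar] using hs
      by_cases hne : PySem.Chars.strip l = []
      · simp only [pmF, hne, List.map_cons, List.takeWhile_cons, List.dropWhile_cons, ih]
        have h0 : PySem.Chars.startswith ([] : List Char) ['*'] = false := by decide
        simp [h0, pmIsStar]
      · simp only [pmF, h1, List.map_cons, List.takeWhile_cons, List.dropWhile_cons, hs, ih]
        simp [hne]

theorem pmF_nil_eq_pmItems (lines : List (List Char)) :
    pmF [] lines = pmItems (lines.map PySem.Chars.strip) := by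
  rw [pmF_span]
  cases lines with
  | nil => simp [pmItems]
  | cons l rest =>
    by_cases hs : pmIsStar (PySem.Chars.strip l) = true
    · simp [hs, pmItems, pmSplitRun]
    · simp [hs, pmItems, pmSplitRun]

theorem pmSection_eq (acc : List (String × List String)) (sec : List Char) :
    pmSectionA acc sec = acc ++ (pmSectionB? sec).toList := by
  unfold pmSectionA pmSectionB?
  cases h : PySem.Chars.splitOn (PySem.Chars.strip sec) ['\n'] with
  | nil => simp
  | cons l0 rest =>
    by_cases h0 : PySem.Chars.strip l0 = []
    · simp [h0]
    · have hit : (let st := rest.foldl pmStepA ([], [])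
          if st.2 ≠ [] then st.1 ++ [PySem.Chars.join ['\n'] st.2] else st.1)
          = pmItems (rest.map PySem.Chars.strip) := by
        have h1 := pmF_eq_finish_fold rest [] []
        rw [pmF_nil_eq_pmItems] at h1
        simpa [pmFinish] using h1
      simp only [h0, hit]
      by_cases h2 : pmHeading l0 ≠ [] ∧ pmItems (rest.map PySem.Chars.strip) ≠ [] <;> simp [h2]

theorem foldl_sectionA_filterMap (secs : List (List Char)) :
    ∀ acc, secs.foldl pmSectionA acc = acc ++ secs.filterMap pmSectionB? := by
  induction secs with
  | nil => intro acc; simp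
  | cons s rest ih =>
    intro acc
    simp only [List.foldl_cons, List.filterMap_cons, ih, pmSection_eq]
    cases pmSectionB? s <;> simp

-- ===== VERDICT (by name: the statement is the Claim_ definition above) =====
theorem parse_menu_spec : Claim_equal_parse_menu := by
  intro s _ _
  unfold Spec_parse_menu parse_menu parse_menu_alt
  rw [foldl_sectionA_filterMap]
  simp
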